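-- pv_equiv track=rewrite | github.com/Debdyuti725/Ayush_hackathon | khana/app2.py | _ensure_section_separators
-- ===== SOURCE A (Python) =====
-- def _ensure_section_separators(md: str) -> str:
--     parts = md.splitlines()
--     out = []
--     first = True
--     for ln in parts:
--         if "class='section-head'" in ln:
--             if not first:
--                 out.append("<hr/>")
--             first = False
--         out.append(ln)
--     return "\n".join(out).strip()
-- ===== SOURCE B (Python) =====
-- def _ensure_section_separators(md: str) -> str:
--     lines = md.splitlines()
--     heads = [i for i, ln in enumerate(lines) if "class='section-head'" in ln]
--     insert_before = set(heads[1:])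
--     out = []
--     for i, ln in enumerate(lines):
--         if i in insert_before:
--             out.append("<hr/>")
--         out.append(ln)
--     return "\n".join(out).strip()
-- ===== Notes on version B (the rewrite author's own statement) =====
-- stated objective: alternative
-- what changed: Replaces the stateful first-head boolean flag with a two-phase build: a pre-pass collects the indices of all section-head lines, all but the first go into a set, and a second pass emits <hr/> before exactly those indices.
import Mathlib
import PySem

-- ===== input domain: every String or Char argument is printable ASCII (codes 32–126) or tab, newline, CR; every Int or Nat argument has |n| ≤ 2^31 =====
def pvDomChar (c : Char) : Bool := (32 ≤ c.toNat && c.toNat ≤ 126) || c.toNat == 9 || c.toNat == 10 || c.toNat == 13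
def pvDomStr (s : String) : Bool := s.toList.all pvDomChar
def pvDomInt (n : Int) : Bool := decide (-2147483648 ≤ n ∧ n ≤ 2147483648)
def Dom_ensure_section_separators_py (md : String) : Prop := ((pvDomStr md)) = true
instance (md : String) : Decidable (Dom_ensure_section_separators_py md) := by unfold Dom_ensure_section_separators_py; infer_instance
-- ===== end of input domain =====

-- B replaces A's stateful first-head boolean flag with a two-phase build: a pre-pass collects
-- the indices of section-head lines (all but the first into a set), then a second pass inserts
-- "<hr/>" before exactly those indices (objective: alternative decomposition, same cost).


-- ===== PORT A =====
def ensure_section_separators_py (md : String) : String :=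
  let parts := PySem.Str.splitlines md
  let st := parts.foldl (fun (s : List String × Bool) ln =>
      if PySem.Str.isIn "class='section-head'" ln then
        ((if s.2 then s.1 else s.1 ++ ["<hr/>"]) ++ [ln], false)
      else (s.1 ++ [ln], s.2)) ([], true)
  PySem.Str.strip (PySem.Str.join "\n" st.1)

-- ===== PORT B =====
def ensure_section_separators_py_alt (md : String) : String :=
  let lines := PySem.Str.splitlines md
  let heads := ((PySem.List.enumerate lines).filter
      (fun q => PySem.Str.isIn "class='section-head'" q.2)).map (fun q => q.1)
  let insertBefore := PySem.Set.ofList (heads.drop 1)  -- heads[1:]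
  let out := (PySem.List.enumerate lines).foldl (fun out q =>
      (if PySem.Set.contains insertBefore q.1 then out ++ ["<hr/>"] else out) ++ [q.2]) []
  PySem.Str.strip (PySem.Str.join "\n" out)

-- ===== PRECONDITION & SPEC =====
def Spec_ensure_section_separators_py (md : String) (out : String) : Prop := out = ensure_section_separators_py_alt md
instance (md : String) (out : String) : Decidable (Spec_ensure_section_separators_py md out) := by unfold Spec_ensure_section_separators_py; infer_instance

-- ===== CLAIM (what is proved, stated in full; the proofs are below) =====
def Claim_equal_ensure_section_separators_py : Prop := ∀ (md : String), Dom_ensure_section_separators_py md → Spec_ensure_section_separators_py md (ensure_section_separators_py md)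

-- ===== LEMMAS AND PROOFS =====

def pvHead (ln : String) : Bool := PySem.Str.isIn "class='section-head'" ln

-- the line list both programs produce: hr before every head line that is not the first head
def pvEmit (seen : Bool) : List String → List String
  | [] => []
  | ln :: rest => (if pvHead ln && seen then ["<hr/>"] else []) ++ ln :: pvEmit (seen || pvHead ln) rest

def pvEmitS (S : PySem.Set Int) (s : Int) : List String → List String
  | [] => []
  | ln :: rest => (if s ∈ S then ["<hr/>"] else []) ++ ln :: pvEmitS S (s + 1) rest

theorem pvA_fold (lines : List String) : ∀ (out : List String) (first : Bool),
    (lines.foldl (fun (s : List String × Bool) ln =>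
      if PySem.Str.isIn "class='section-head'" ln then
        ((if s.2 then s.1 else s.1 ++ ["<hr/>"]) ++ [ln], false)
      else (s.1 ++ [ln], s.2)) (out, first)).1 = out ++ pvEmit (!first) lines := by
  induction lines with
  | nil => intro out first; simp [pvEmit]
  | cons ln rest ih =>
      intro out first
      rw [List.foldl_cons]
      by_cases hb : PySem.Str.isIn "class='section-head'" ln = true
      · dsimp only
        rw [if_pos hb, ih]
        have hh : pvHead ln = true := hb
        cases first <;> simp [pvEmit, hh]
      · dsimp only
        rw [if_neg hb, ih]
        have hh : pvHead ln = false := Bool.eq_false_iff.mpr hb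
        cases first <;> simp [pvEmit, hh]

theorem pvB_fold (L : List String) : ∀ (S : PySem.Set Int) (s : Int) (out : List String),
    ((PySem.List.enumerate L s).foldl (fun out (q : Int × String) =>
      (if PySem.Set.contains S q.1 then out ++ ["<hr/>"] else out) ++ [q.2]) out)
      = out ++ pvEmitS S s L := by
  induction L with
  | nil => intro S s out; simp [PySem.List.enumerate_nil, pvEmitS]
  | cons ln rest ih =>
      intro S s out
      rw [PySem.List.enumerate_cons, List.foldl_cons]
      by_cases hb : s ∈ S
      · dsimp only
        rw [if_pos (by simp [hb]), ih]
        simp [pvEmitS, hb]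
      · dsimp only
        rw [if_neg (by simp [hb]), ih]
        simp [pvEmitS, hb]

theorem pvEmitS_eq_pvEmit (rest : List String) : ∀ (S : PySem.Set Int) (s : Int) (seen : Bool),
    (∀ k : Nat, k < rest.length →
      ((s + (k : Int)) ∈ S ↔
        (pvHead (rest.getD k "") = true ∧ (seen = true ∨ ∃ j : Nat, j < k ∧ pvHead (rest.getD j "") = true)))) →
    pvEmitS S s rest = pvEmit seen rest := by
  induction rest with
  | nil => intro S s seen _; simp [pvEmitS, pvEmit]
  | cons ln tl ih =>
      intro S s seen H
      have H0 := H 0 (by simp)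
      simp at H0
      have hrec : pvEmitS S (s + 1) tl = pvEmit (seen || pvHead ln) tl := by
        apply ih
        intro k hk
        have Hk := H (k + 1) (by simpa using Nat.succ_lt_succ hk)
        have hcast : s + 1 + (k : Int) = s + ((k + 1 : Nat) : Int) := by push_cast; ring
        rw [hcast]
        simp only [List.getD_cons_succ] at Hk
        rw [Hk]
        constructor
        · rintro ⟨h1, h2⟩
          refine ⟨h1, ?_⟩
          rcases h2 with h2 | ⟨j, hj, hpj⟩
          · left; simp [h2]
          · cases j with
            | zero => left; simp only [List.getD_cons_zero] at hpj; simp [hpj]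
            | succ j' =>
                right; exact ⟨j', Nat.lt_of_succ_lt_succ hj, by simpa using hpj⟩
        · rintro ⟨h1, h2⟩
          refine ⟨h1, ?_⟩
          rcases h2 with h2 | ⟨j, hj, hpj⟩
          · simp only [Bool.or_eq_true] at h2
            rcases h2 with h2 | h2
            · exact Or.inl h2
            · exact Or.inr ⟨0, Nat.succ_pos _, by simpa using h2⟩
          · exact Or.inr ⟨j + 1, Nat.succ_lt_succ hj, by simpa using hpj⟩
      by_cases hc : s ∈ S
      · have hx := H0.mp hc
        simp [pvEmitS, pvEmit, hrec, hc, hx.1, hx.2]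
      · have h2 : (pvHead ln && seen) = false := by
          cases hp : pvHead ln <;> cases hs : seen <;> simp_all
        simp [pvEmitS, pvEmit, hrec, hc, h2]

-- membership in xs.drop 1 for a strictly increasing list: in xs and not minimal
theorem pv_mem_drop_one {xs : List Int} (hp : xs.Pairwise (· < ·)) (x : Int) :
    x ∈ xs.drop 1 ↔ (x ∈ xs ∧ ∃ y ∈ xs, y < x) := by
  cases xs with
  | nil => simp
  | cons a tl =>
      simp only [List.drop_one, List.tail_cons, List.pairwise_cons] at hp ⊢
      constructor
      · intro hx
        exact ⟨List.mem_cons_of_mem _ hx, a, List.mem_cons_self, hp.1 x hx⟩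
      · rintro ⟨hx, y, hy, hyx⟩
        rcases List.mem_cons.mp hx with rfl | hx
        · rcases List.mem_cons.mp hy with rfl | hy
          · exact absurd hyx (lt_irrefl _)
          · exact absurd hyx (not_lt.mpr (le_of_lt (hp.1 y hy)))
        · exact hx

theorem pv_mem_heads (L : List String) (i : Int) :
    i ∈ (((PySem.List.enumerate L).filter
        (fun q => PySem.Str.isIn "class='section-head'" q.2)).map (fun q => q.1)) ↔
      ∃ m : Nat, m < L.length ∧ i = (m : Int) ∧ pvHead (L.getD m "") = true := by
  simp only [List.mem_map, List.mem_filter, PySem.List.mem_enumerate_iff]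
  constructor
  · rintro ⟨q, ⟨⟨m, hm, rfl⟩, hq⟩, rfl⟩
    exact ⟨m, hm, by simp, by simpa [pvHead, List.getD_eq_getElem?_getD, hm] using hq⟩
  · rintro ⟨m, hm, rfl, hph⟩
    exact ⟨((m : Int), L[m]), ⟨⟨m, hm, by simp⟩,
      by simpa [pvHead, List.getD_eq_getElem?_getD, hm] using hph⟩, rfl⟩

theorem pv_pairwise_heads (L : List String) :
    (((PySem.List.enumerate L).filter
        (fun q => PySem.Str.isIn "class='section-head'" q.2)).map (fun q => q.1)).Pairwise (· < ·) := by
  apply List.Pairwise.map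
  · exact fun a b h => h
  · exact (PySem.List.pairwise_lt_enumerate L 0).filter _

-- ===== VERDICT (by name: the statement is the Claim_ definition above) =====
theorem ensure_section_separators_py_spec : Claim_equal_ensure_section_separators_py := by
  intro md _
  unfold Spec_ensure_section_separators_py ensure_section_separators_py ensure_section_separators_py_alt
  dsimp only
  rw [pvA_fold, pvB_fold]
  have hemit : pvEmitS
      (PySem.Set.ofList (((((PySem.List.enumerate (PySem.Str.splitlines md)).filter
        (fun q => PySem.Str.isIn "class='section-head'" q.2)).map (fun q => q.1))).drop 1))
      0 (PySem.Str.splitlines md) = pvEmit false (PySem.Str.splitlines md) := by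
    apply pvEmitS_eq_pvEmit
    intro k hk
    rw [zero_add, PySem.Set.mem_ofList,
      pv_mem_drop_one (pv_pairwise_heads (PySem.Str.splitlines md))]
    constructor
    · rintro ⟨hin, y, hy, hyk⟩
      rcases (pv_mem_heads _ _).mp hin with ⟨m, hm, hmk, hpm⟩
      have hmk' : m = k := by exact_mod_cast hmk.symm
      subst hmk'
      rcases (pv_mem_heads _ _).mp hy with ⟨j, hj, rfl, hpj⟩
      exact ⟨hpm, Or.inr ⟨j, by exact_mod_cast hyk, hpj⟩⟩
    · rintro ⟨hpk, h2⟩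
      rcases h2 with h2 | ⟨j, hjk, hpj⟩
      · simp at h2
      · exact ⟨(pv_mem_heads _ _).mpr ⟨k, hk, rfl, hpk⟩, (j : Int),
          (pv_mem_heads _ _).mpr ⟨j, Nat.lt_trans hjk hk, rfl, hpj⟩, by exact_mod_cast hjk⟩
  rw [hemit]
  rfl
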